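-- pv_equiv track=rewrite | github.com/asthtls/FineDust_Concentration_Prediction_Program-GUI- | data/zero_data_load.py | pred_zero_index
-- ===== SOURCE A (Python) =====
-- def pred_zero_index(train_data):
--     max_len = 0
--     for i in range(len(train_data[0])): # x 데이터의 특성만큼
--         tmp_len = 0
--         tmp_index = []
--         tmp_index2 = []
--         for j in range(len(train_data)):  # 해당 데이터의 수 ex) 5494
--             if train_data[j][i]== 0:
--                 tmp_len += 1
--                 tmp_index.append(j)
--
--             elif train_data[j][i] != 0:
--                 tmp_index2.append(j)
--
--         if tmp_len >= max_len:
--             max_len = tmp_len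
--             zero_index = tmp_index
--             exist_index = tmp_index2
--         else:
--             pass
--     return zero_index, exist_index
-- ===== SOURCE B (Python) =====
-- def pred_zero_index(train_data):
--     n_cols = len(train_data[0])
--     counts = [len([j for j in range(len(train_data)) if train_data[j][i] == 0])
--               for i in range(n_cols)]
--     m = max(counts)
--     best = n_cols - 1 - counts[::-1].index(m)  # last column with the maximal zero count
--     zero_index = [j for j in range(len(train_data)) if train_data[j][best] == 0]
--     exist_index = [j for j in range(len(train_data)) if train_data[j][best] != 0]
--     return zero_index, exist_index
-- ===== Notes on version B (the rewrite author's own statement) =====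
-- stated objective: simpler
-- what changed: B first computes only the per-column zero counts, selects the last argmax column via max() and a reversed index(), and builds the two index lists in one final pass over that single column, instead of A's building and repeatedly discarding full index lists for every column.
import Mathlib
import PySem

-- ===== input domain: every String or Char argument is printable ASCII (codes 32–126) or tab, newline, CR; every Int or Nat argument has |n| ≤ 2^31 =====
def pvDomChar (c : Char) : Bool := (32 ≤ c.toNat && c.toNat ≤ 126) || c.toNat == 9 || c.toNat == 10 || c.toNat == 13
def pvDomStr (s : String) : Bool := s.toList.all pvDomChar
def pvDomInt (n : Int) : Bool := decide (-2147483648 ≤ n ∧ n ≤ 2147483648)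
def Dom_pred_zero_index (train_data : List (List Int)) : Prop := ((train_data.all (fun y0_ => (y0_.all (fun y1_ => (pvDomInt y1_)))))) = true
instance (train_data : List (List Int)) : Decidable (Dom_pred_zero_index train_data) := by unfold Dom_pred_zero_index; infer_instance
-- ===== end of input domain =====

-- B computes only per-column zero COUNTS, picks the last argmax column, then
-- classifies the rows of that single column in one final pass; same value as A
-- on every input A accepts (no mutation of the argument in either version).

-- ===== PORT A =====
-- inner `for j` loop of A: (tmp_len, tmp_index, tmp_index2) for column i.
-- Indexing uses getD: under Pre_ both indices are always in range, so this is
-- exact where A returns; A's `if v==0 / elif v!=0` is exhaustive on ints.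
def pzA_inner (train_data : List (List Int)) (i : Nat) : Int × List Int × List Int :=
  (List.range train_data.length).foldl
    (fun st j =>
      if (train_data.getD j []).getD i 0 = 0 then
        (st.1 + 1, st.2.1 ++ [(j : Int)], st.2.2)
      else
        (st.1, st.2.1, st.2.2 ++ [(j : Int)]))
    (0, [], [])

def pred_zero_index (train_data : List (List Int)) : List Int × List Int :=
  let res := (List.range (train_data.headD []).length).foldl
    (fun st i =>
      let t := pzA_inner train_data i
      if st.1 ≤ t.1 then t else st)
    ((0 : Int), ([], []))
  (res.2.1, res.2.2)

-- ===== PORT B =====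
-- zero count of column i (len of the comprehension in Source B)
def pzB_count (train_data : List (List Int)) (i : Nat) : Int :=
  ((List.range train_data.length).filter
    (fun j => (train_data.getD j []).getD i 0 = 0)).length

def pred_zero_index_alt (train_data : List (List Int)) : List Int × List Int :=
  let nCols := (train_data.headD []).length
  let counts := (List.range nCols).map (fun i => pzB_count train_data i)
  let m := ((PySem.List.max? counts (fun x => x)).getD 0)
  let best := nCols - 1 - ((PySem.List.index? counts.reverse m).getD 0)
  ( ((List.range train_data.length).filter
      (fun j => (train_data.getD j []).getD best 0 = 0)).map (fun j => (j : Int)),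
    ((List.range train_data.length).filter
      (fun j => ¬ (train_data.getD j []).getD best 0 = 0)).map (fun j => (j : Int)) )

-- ===== PRECONDITION & SPEC =====
-- A raises on the excluded inputs: IndexError on empty train_data or on a row
-- shorter than row 0, UnboundLocalError when row 0 is empty (no columns).
def Pre_pred_zero_index (train_data : List (List Int)) : Prop :=
  train_data ≠ [] ∧ (train_data.headD []).length ≠ 0 ∧
    ∀ row ∈ train_data, (train_data.headD []).length ≤ row.length
instance (train_data : List (List Int)) : Decidable (Pre_pred_zero_index train_data) := by
  unfold Pre_pred_zero_index; infer_instance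

def pvWitness_pred_zero_index : List (List Int) := [[0, 1], [2, 0], [0, 0]]

def Spec_pred_zero_index (train_data : List (List Int)) (out : List Int × List Int) : Prop := out = pred_zero_index_alt train_data
instance (train_data : List (List Int)) (out : List Int × List Int) : Decidable (Spec_pred_zero_index train_data out) := by unfold Spec_pred_zero_index; infer_instance

-- ===== CLAIM (what is proved, stated in full; the proofs are below) =====
def Claim_equal_pred_zero_index : Prop := ∀ (train_data : List (List Int)), Dom_pred_zero_index train_data → Pre_pred_zero_index train_data → Spec_pred_zero_index train_data (pred_zero_index train_data)

-- ===== LEMMAS AND PROOFS =====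

-- canonical per-column data: zero count, zero-row list, nonzero-row list
def pzc (td : List (List Int)) (i : Nat) : Nat :=
  ((List.range td.length).filter (fun j => (td.getD j []).getD i 0 = 0)).length
def pzl (td : List (List Int)) (i : Nat) : List Int :=
  ((List.range td.length).filter (fun j => (td.getD j []).getD i 0 = 0)).map (fun j => (j : Int))
def pel (td : List (List Int)) (i : Nat) : List Int :=
  ((List.range td.length).filter (fun j => ¬ (td.getD j []).getD i 0 = 0)).map (fun j => (j : Int))

-- A's inner loop over any index list, with an arbitrary accumulator
theorem pz_inner_fold (td : List (List Int)) (i : Nat) (l : List Nat)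
    (c : Int) (z e : List Int) :
    l.foldl (fun st j =>
        if (td.getD j []).getD i 0 = 0 then
          (st.1 + 1, st.2.1 ++ [(j : Int)], st.2.2)
        else
          (st.1, st.2.1, st.2.2 ++ [(j : Int)])) (c, z, e)
      = (c + ((l.filter (fun j => (td.getD j []).getD i 0 = 0)).length : Int),
         z ++ (l.filter (fun j => (td.getD j []).getD i 0 = 0)).map (fun j => (j : Int)),
         e ++ (l.filter (fun j => ¬ (td.getD j []).getD i 0 = 0)).map (fun j => (j : Int))) := by
  induction l generalizing c z e with
  | nil => simp
  | cons a l ih =>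
    simp only [List.foldl_cons]
    by_cases h : (td.getD a []).getD i 0 = 0
    · rw [if_pos h, ih,
        List.filter_cons_of_pos (by simpa using h),
        List.filter_cons_of_neg (by simpa using h)]
      simp
      omega
    · rw [if_neg h, ih,
        List.filter_cons_of_neg (by simpa using h),
        List.filter_cons_of_pos (by simpa using h)]
      simp

theorem pzA_inner_eq (td : List (List Int)) (i : Nat) :
    pzA_inner td i = ((pzc td i : Int), pzl td i, pel td i) := by
  unfold pzA_inner pzc pzl pel
  rw [pz_inner_fold]
  simp

-- A's outer loop ends at the LAST column attaining the maximal zero count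
theorem pz_outer (td : List (List Int)) (n : Nat) (hn : 0 < n) :
    ∃ b, b < n ∧
      (List.range n).foldl (fun st i =>
          let t := pzA_inner td i
          if st.1 ≤ t.1 then t else st) ((0 : Int), ([], []))
        = ((pzc td b : Int), pzl td b, pel td b) ∧
      (∀ j, j < n → pzc td j ≤ pzc td b) ∧
      (∀ j, b < j → j < n → pzc td j < pzc td b) := by
  induction n with
  | zero => omega
  | succ n ih =>
    by_cases hn0 : n = 0
    · subst hn0
      refine ⟨0, by omega, ?_, ?_, by intro j h1 h2; omega⟩
      · simp [pzA_inner_eq]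
      · intro j hj
        have : j = 0 := by omega
        subst this; exact le_rfl
    · obtain ⟨b, hb, hfold, hmax, hlast⟩ := ih (by omega)
      rw [List.range_succ, List.foldl_append, hfold]
      simp only [List.foldl_cons, List.foldl_nil, pzA_inner_eq]
      by_cases h : (pzc td b : Int) ≤ (pzc td n : Int)
      · refine ⟨n, by omega, by simp [h], ?_, by intro j h1 h2; omega⟩
        intro j hj
        have hbn : pzc td b ≤ pzc td n := by exact_mod_cast h
        rcases Nat.lt_succ_iff_lt_or_eq.mp hj with hj' | hj'
        · exact le_trans (hmax j hj') hbn
        · subst hj'; exact le_rfl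
      · have hnb : pzc td n < pzc td b := by exact_mod_cast not_le.mp h
        refine ⟨b, by omega, by simp [h], ?_, ?_⟩
        · intro j hj
          rcases Nat.lt_succ_iff_lt_or_eq.mp hj with hj' | hj'
          · exact hmax j hj'
          · subst hj'; exact le_of_lt hnb
        · intro j hj1 hj2
          rcases Nat.lt_succ_iff_lt_or_eq.mp hj2 with hj' | hj'
          · exact hlast j hj1 hj'
          · subst hj'; exact hnb

-- first-occurrence characterisation of index?
theorem pz_index?_eq (l : List Int) (v : Int) (k : Nat) (hk : k < l.length)
    (h1 : l[k] = v) (h2 : ∀ j (hj : j < k), l[j]'(by omega) ≠ v) :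
    PySem.List.index? l v = some k := by
  induction l generalizing k with
  | nil => simp at hk
  | cons a l ih =>
    cases k with
    | zero =>
      simp only [List.getElem_cons_zero] at h1
      subst h1
      exact PySem.List.index?_cons_self a l
    | succ k =>
      have ha : a ≠ v := by simpa using h2 0 (by omega)
      rw [PySem.List.index?_cons_of_ne l ha,
        ih k (by simpa using hk) (by simpa using h1)
          (fun j hj => by simpa using h2 (j + 1) (by omega))]
      rfl

theorem pred_zero_index_spec : Claim_equal_pred_zero_index := by
  intro td _ hpre
  obtain ⟨hne, hcols, _⟩ := hpre
  set n := (td.headD []).length with hn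
  have hn0 : 0 < n := Nat.pos_of_ne_zero hcols
  obtain ⟨b, hb, hfold, hmax, hlast⟩ := pz_outer td n hn0
  have hclen : ((List.range n).map (fun i => pzB_count td i)).length = n := by simp
  have hget : ∀ (j : Nat) (hj : j < n),
      ((List.range n).map (fun i => pzB_count td i))[j]'(by simpa using hj)
        = (pzc td j : Int) := by
    intro j hj
    simp [pzB_count, pzc]
  have hmem : (pzc td b : Int) ∈ (List.range n).map (fun i => pzB_count td i) := by
    rw [← hget b hb]
    exact List.getElem_mem _
  obtain ⟨m, hm⟩ : ∃ m, PySem.List.max?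
      ((List.range n).map (fun i => pzB_count td i)) (fun x => x) = some m := by
    cases h : PySem.List.max? ((List.range n).map (fun i => pzB_count td i)) (fun x => x) with
    | none =>
      rw [PySem.List.max?_eq_none_iff] at h
      rw [h] at hclen
      simp at hclen
      omega
    | some m => exact ⟨m, rfl⟩
  have hmb : m = (pzc td b : Int) := by
    have h1 : m ≤ (pzc td b : Int) := by
      obtain ⟨i, hi, hie⟩ := List.mem_map.mp (PySem.List.max?_mem hm)
      have hi' := List.mem_range.mp hi
      calc m = (pzc td i : Int) := by rw [← hie]; simp [pzB_count, pzc]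
        _ ≤ (pzc td b : Int) := by exact_mod_cast hmax i hi'
    have h2 : (pzc td b : Int) ≤ m := PySem.List.max?_isMax hm _ hmem
    omega
  have hidx : PySem.List.index?
      ((List.range n).map (fun i => pzB_count td i)).reverse m = some (n - 1 - b) := by
    apply pz_index?_eq _ _ _ (by simp; omega)
    · rw [List.getElem_reverse]
      simp only [hclen]
      have harg : n - 1 - (n - 1 - b) = b := by omega
      rw [hget _ (by omega), harg, hmb]
    · intro j hj
      rw [List.getElem_reverse]
      simp only [hclen]
      rw [hget _ (by omega), hmb]
      have hgt : b < n - 1 - j := by omega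
      have hlt := hlast _ hgt (by omega)
      intro hcon
      have : pzc td (n - 1 - j) = pzc td b := by exact_mod_cast hcon
      omega
  show pred_zero_index td = pred_zero_index_alt td
  unfold pred_zero_index pred_zero_index_alt
  rw [← hn, hfold]
  simp only [hm, hidx, Option.getD_some]
  have hbest : n - 1 - (n - 1 - b) = b := by omega
  rw [hbest]
  simp [pzl, pel]
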